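-- pv_equiv track=rewrite | github.com/a81257/ns3 | ns-3-ub-tools/traffic_maker/algorithms/all_reduce/recursive_hd.py | _build_active_rank_maps
-- ===== SOURCE A (Python) =====
-- import math
-- from typing import IO, List, Tuple
--
-- def _largest_power_of_two_leq(n: int) -> int:
--     n = int(n)
--     if n <= 0:
--         raise ValueError("n must be positive")
--     return 1 << int(math.floor(math.log2(n)))
--
-- def _calc_block_and_part1(rank_size: int) -> tuple[int, int]:
--     rank_size = int(rank_size)
--     if rank_size <= 0:
--         raise ValueError("rank_size must be positive")
--     block_size = _largest_power_of_two_leq(rank_size)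
--     part1_size = (rank_size - block_size) * 2
--     return block_size, part1_size
--
-- def _build_active_rank_maps(rank_size: int) -> tuple[int, int, List[int], List[int | None]]:
--     block_size, part1_size = _calc_block_and_part1(rank_size)
--
--     active_to_real: List[int] = []
--     for r in range(min(part1_size, rank_size)):
--         if (r % 2) == 0:
--             active_to_real.append(r)
--     for r in range(part1_size, rank_size):
--         active_to_real.append(r)
--
--     if len(active_to_real) != block_size:
--         raise RuntimeError(
--             f"recursive_hd mapping internal error: active_to_real size {len(active_to_real)} != block_size {block_size}"
--         )
--
--     real_to_active: List[int | None] = [None] * rank_size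
--     for a, r in enumerate(active_to_real):
--         real_to_active[r] = a
--
--     return block_size, part1_size, active_to_real, real_to_active
-- ===== SOURCE B (Python) =====
-- import math
-- from typing import List
--
-- def _largest_power_of_two_leq(n: int) -> int:
--     n = int(n)
--     if n <= 0:
--         raise ValueError("n must be positive")
--     return 1 << int(math.floor(math.log2(n)))
--
-- def _calc_block_and_part1(rank_size: int) -> tuple[int, int]:
--     rank_size = int(rank_size)
--     if rank_size <= 0:
--         raise ValueError("rank_size must be positive")
--     block_size = _largest_power_of_two_leq(rank_size)
--     part1_size = (rank_size - block_size) * 2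
--     return block_size, part1_size
--
-- def _build_active_rank_maps(rank_size: int) -> tuple[int, int, List[int], List[int | None]]:
--     block_size, part1_size = _calc_block_and_part1(rank_size)
--     half = part1_size // 2
--     # active ranks: the even reals below part1_size, then the contiguous tail.
--     active_to_real: List[int] = [2 * a for a in range(half)] + list(range(part1_size, rank_size))
--     # inverse map computed directly by formula instead of scatter-writes.
--     real_to_active: List[int | None] = [
--         ((r // 2) if (r % 2) == 0 else None) if r < part1_size else half + (r - part1_size)
--         for r in range(rank_size)
--     ]
--     return block_size, part1_size, active_to_real, real_to_active
-- ===== Notes on version B (the rewrite author's own statement) =====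
-- stated objective: simpler
-- what changed: B computes active_to_real by closed-form arithmetic (doubled prefix plus contiguous tail) and real_to_active by a direct per-index formula over range(rank_size), replacing A's modulo-filter loop and its scatter-write inversion pass.
-- outside the precondition, e.g. on _build_active_rank_maps(0): A raises ValueError, B raises ValueError
import Mathlib
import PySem

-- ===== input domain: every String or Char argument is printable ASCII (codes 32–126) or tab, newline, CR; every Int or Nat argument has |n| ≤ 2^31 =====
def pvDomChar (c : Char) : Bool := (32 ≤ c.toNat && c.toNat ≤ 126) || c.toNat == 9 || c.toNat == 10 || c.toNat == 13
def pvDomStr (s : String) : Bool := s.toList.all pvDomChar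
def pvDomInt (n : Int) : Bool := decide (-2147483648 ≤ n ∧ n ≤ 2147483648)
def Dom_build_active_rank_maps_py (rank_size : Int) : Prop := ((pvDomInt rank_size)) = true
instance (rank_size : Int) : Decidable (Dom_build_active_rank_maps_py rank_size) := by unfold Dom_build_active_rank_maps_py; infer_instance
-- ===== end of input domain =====

-- B replaces A's filter-loop and scatter-write inverse with direct arithmetic formulas for
-- both index maps (objective: simpler; same asymptotic cost).

-- ===== PORT A =====
-- 1 << int(math.floor(math.log2(n))); the float log2 is exact for 0 < n ≤ 2^31, so this
-- integer formulation computes the same value on the whole admitted domain.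
def largest_power_of_two_leq (n : Int) : Int :=
  (2 : Int) ^ (Nat.log 2 n.toNat)

def build_active_rank_maps_py (rank_size : Int) : Int × Int × List Int × List (Option Int) :=
  let block_size := largest_power_of_two_leq rank_size
  let part1_size := (rank_size - block_size) * 2
  -- first loop: collect even r below min(part1_size, rank_size)
  let atr1 := (PySem.List.pyRange 0 (min part1_size rank_size) 1).foldl
    (fun acc r => if PySem.Int.mod r 2 == 0 then acc ++ [r] else acc) []
  -- second loop: append the tail range
  let active_to_real := (PySem.List.pyRange part1_size rank_size 1).foldl
    (fun acc r => acc ++ [r]) atr1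
  -- (the RuntimeError guard never fires on Pre_: len(active_to_real) = block_size there)
  let init : List (Option Int) := List.replicate rank_size.toNat none
  let real_to_active := (PySem.List.enumerate active_to_real 0).foldl
    (fun acc ar => PySem.List.pySetD acc ar.2 (some ar.1)) init
  (block_size, part1_size, active_to_real, real_to_active)

-- ===== PORT B =====
def build_active_rank_maps_py_alt (rank_size : Int) : Int × Int × List Int × List (Option Int) :=
  let block_size := largest_power_of_two_leq rank_size
  let part1_size := (rank_size - block_size) * 2
  let half := PySem.Int.floordiv part1_size 2
  let active_to_real := (PySem.List.pyRange 0 half 1).map (fun a => 2 * a)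
    ++ PySem.List.pyRange part1_size rank_size 1
  let real_to_active := (PySem.List.pyRange 0 rank_size 1).map (fun r =>
    if r < part1_size then
      (if PySem.Int.mod r 2 == 0 then some (PySem.Int.floordiv r 2) else none)
    else some (half + (r - part1_size)))
  (block_size, part1_size, active_to_real, real_to_active)

-- ===== PRECONDITION & SPEC =====
-- Pre_ excludes exactly rank_size ≤ 0, where A raises ValueError ("rank_size must be positive").
def Pre_build_active_rank_maps_py (rank_size : Int) : Prop := 1 ≤ rank_size
instance (rank_size : Int) : Decidable (Pre_build_active_rank_maps_py rank_size) := by unfold Pre_build_active_rank_maps_py; infer_instance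
def pvWitness_build_active_rank_maps_py : Int := 6

def Spec_build_active_rank_maps_py (rank_size : Int) (out : Int × Int × List Int × List (Option Int)) : Prop := out = build_active_rank_maps_py_alt rank_size
instance (rank_size : Int) (out : Int × Int × List Int × List (Option Int)) : Decidable (Spec_build_active_rank_maps_py rank_size out) := by unfold Spec_build_active_rank_maps_py; infer_instance

-- ===== CLAIM (what is proved, stated in full; the proofs are below) =====
def Claim_equal_build_active_rank_maps_py : Prop := ∀ (rank_size : Int), Dom_build_active_rank_maps_py rank_size → Pre_build_active_rank_maps_py rank_size → Spec_build_active_rank_maps_py rank_size (build_active_rank_maps_py rank_size)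

-- ===== LEMMAS AND PROOFS =====

-- A's first loop collects exactly the doubled range.
theorem pv_evens_loop (h : Nat) (acc : List Int) :
    (PySem.List.pyRange 0 (2 * (h : Int)) 1).foldl
      (fun acc r => if PySem.Int.mod r 2 == 0 then acc ++ [r] else acc) acc
    = acc ++ (PySem.List.pyRange 0 (h : Int) 1).map (fun a => 2 * a) := by
  induction h generalizing acc with
  | zero => simp [PySem.List.pyRange_one_eq_nil]
  | succ m ih =>
    have e1 : (2 : Int) * ((m : Int) + 1) = (2 * (m : Int) + 1) + 1 := by ring
    have r1 : PySem.List.pyRange 0 (2 * ((m : Int) + 1)) 1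
        = PySem.List.pyRange 0 (2 * (m : Int) + 1) 1 ++ [2 * (m : Int) + 1] := by
      rw [e1, PySem.List.pyRange_one_succ_right (by positivity)]
    have r2 : PySem.List.pyRange 0 (2 * (m : Int) + 1) 1
        = PySem.List.pyRange 0 (2 * (m : Int)) 1 ++ [2 * (m : Int)] := by
      rw [PySem.List.pyRange_one_succ_right (by positivity)]
    have r3 : PySem.List.pyRange 0 ((m : Int) + 1) 1
        = PySem.List.pyRange 0 (m : Int) 1 ++ [(m : Int)] := by
      rw [PySem.List.pyRange_one_succ_right (by positivity)]
    push_cast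
    rw [r1, r2, List.foldl_append, List.foldl_append, ih, r3]
    simp

-- A's second loop is list append.
theorem pv_snoc_loop (l : List Int) (acc : List Int) :
    l.foldl (fun acc r => acc ++ [r]) acc = acc ++ l := by
  induction l generalizing acc with
  | nil => simp
  | cons x t ih => simp [List.foldl_cons, ih, List.append_assoc]

-- scatter fold preserves length
theorem pv_fold_length (ps : List (Int × Int)) (init : List (Option Int)) :
    (ps.foldl (fun acc ar => PySem.List.pySetD acc ar.2 (some ar.1)) init).length
      = init.length := by
  induction ps generalizing init with
  | nil => rfl
  | cons x t ih => simp [List.foldl_cons, ih, PySem.List.length_pySetD]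

-- untouched index: if no pair writes index k, the fold leaves it alone
theorem pv_fold_untouched (ps : List (Int × Int)) (init : List (Option Int)) (k : Nat)
    (hb : ∀ p ∈ ps, 0 ≤ p.2)
    (hne : ∀ p ∈ ps, p.2 ≠ (k : Int)) :
    (ps.foldl (fun acc ar => PySem.List.pySetD acc ar.2 (some ar.1)) init)[k]?
      = init[k]? := by
  induction ps generalizing init with
  | nil => rfl
  | cons x t ih =>
    rw [List.foldl_cons, ih _ (fun p hp => hb p (List.mem_cons_of_mem _ hp))
        (fun p hp => hne p (List.mem_cons_of_mem _ hp))]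
    rw [PySem.List.pySetD_of_nonneg]
    · exact List.getElem?_set_ne (by
        have h1 := hb x List.mem_cons_self
        have h2 := hne x List.mem_cons_self
        omega)
    · exact hb x List.mem_cons_self

-- hit index: if exactly one pair writes index k, the fold stores its tag there
theorem pv_fold_hit (ps : List (Int × Int)) (init : List (Option Int)) (a : Int) (k : Nat)
    (hb : ∀ p ∈ ps, 0 ≤ p.2)
    (hlen : k < init.length)
    (hnd : (ps.map (·.2)).Nodup)
    (hmem : (a, (k : Int)) ∈ ps) :
    (ps.foldl (fun acc ar => PySem.List.pySetD acc ar.2 (some ar.1)) init)[k]?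
      = some (some a) := by
  induction ps generalizing init with
  | nil => cases hmem
  | cons x t ih =>
    rw [List.map_cons] at hnd
    rcases List.mem_cons.mp hmem with h | h
    · subst h
      rw [List.foldl_cons,
        pv_fold_untouched t _ k (fun p hp => hb p (List.mem_cons_of_mem _ hp))
          (fun p hp hpk => (List.nodup_cons.mp hnd).1
            (hpk ▸ List.mem_map_of_mem (f := fun q => q.2) hp))]
      rw [PySem.List.pySetD_of_nonneg]
      · simp only [Int.toNat_natCast]
        exact List.getElem?_set_self hlen
      · simp
    · rw [List.foldl_cons]
      exact ih _ (fun p hp => hb p (List.mem_cons_of_mem _ hp))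
        (by rw [PySem.List.length_pySetD]; exact hlen) (List.nodup_cons.mp hnd).2 h

-- A's two appending loops build exactly B's closed-form active_to_real list.
theorem pv_atr (n b : Int) (hb2 : b ≤ n) (hb3 : n < 2 * b) :
    (PySem.List.pyRange ((n - b) * 2) n 1).foldl (fun acc r => acc ++ [r])
      ((PySem.List.pyRange 0 (min ((n - b) * 2) n) 1).foldl
        (fun acc r => if PySem.Int.mod r 2 == 0 then acc ++ [r] else acc) [])
    = (PySem.List.pyRange 0 (n - b) 1).map (fun a => 2 * a)
      ++ PySem.List.pyRange ((n - b) * 2) n 1 := by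
  have hmin : min ((n - b) * 2) n = (n - b) * 2 := min_eq_left (by omega)
  have hcast : ((n - b).toNat : Int) = n - b := by omega
  have e : (n - b) * 2 = 2 * (((n - b).toNat : Nat) : Int) := by omega
  rw [hmin, e, pv_evens_loop, pv_snoc_loop, List.nil_append, hcast]

-- A's scatter-write inversion of that list is B's per-index formula.
theorem pv_rta (n b : Int) (h1 : 1 ≤ n) (hb2 : b ≤ n) (hb3 : n < 2 * b) :
    (PySem.List.enumerate
        ((PySem.List.pyRange 0 (n - b) 1).map (fun a => 2 * a)
          ++ PySem.List.pyRange ((n - b) * 2) n 1) 0).foldl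
      (fun acc ar => PySem.List.pySetD acc ar.2 (some ar.1))
      (List.replicate n.toNat none)
    = (PySem.List.pyRange 0 n 1).map (fun r =>
        if r < (n - b) * 2 then
          (if PySem.Int.mod r 2 == 0 then some (PySem.Int.floordiv r 2) else none)
        else some ((n - b) + (r - (n - b) * 2))) := by
  have hNn : ((n.toNat : Nat) : Int) = n := by omega
  have hMlen : ((PySem.List.pyRange 0 (n - b) 1).map (fun a => (2:Int) * a)).length
      = (n - b).toNat := by
    simp [PySem.List.length_pyRange_one]
  have hTlen : (PySem.List.pyRange ((n - b) * 2) n 1).length = (n - (n - b) * 2).toNat := by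
    simp [PySem.List.length_pyRange_one]
  have hMmem : ∀ x ∈ (PySem.List.pyRange 0 (n - b) 1).map (fun a => (2:Int) * a),
      ∃ a : Int, 0 ≤ a ∧ a < n - b ∧ x = 2 * a := by
    intro x hx
    obtain ⟨a, ha, rfl⟩ := List.mem_map.mp hx
    obtain ⟨h1a, h2a⟩ := (PySem.List.mem_pyRange_one).mp ha
    exact ⟨a, h1a, h2a, rfl⟩
  have hTmem : ∀ x ∈ PySem.List.pyRange ((n - b) * 2) n 1, (n - b) * 2 ≤ x ∧ x < n :=
    fun x hx => (PySem.List.mem_pyRange_one).mp hx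
  have hLnd : ((PySem.List.pyRange 0 (n - b) 1).map (fun a => (2:Int) * a)
      ++ PySem.List.pyRange ((n - b) * 2) n 1).Nodup := by
    refine List.Nodup.append ?_ (PySem.List.nodup_pyRange_one _ _) ?_
    · exact (PySem.List.nodup_pyRange_one _ _).map (fun a c h => by omega)
    · intro x hx hx'
      obtain ⟨a, h1a, h2a, rfl⟩ := hMmem x hx
      have := hTmem _ hx'
      omega
  have hLbd : ∀ x ∈ (PySem.List.pyRange 0 (n - b) 1).map (fun a => (2:Int) * a)
      ++ PySem.List.pyRange ((n - b) * 2) n 1, 0 ≤ x ∧ x < n := by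
    intro x hx
    rcases List.mem_append.mp hx with h | h
    · obtain ⟨a, h1a, h2a, rfl⟩ := hMmem x h
      omega
    · have := hTmem x h
      omega
  have hbds : ∀ p ∈ PySem.List.enumerate
      ((PySem.List.pyRange 0 (n - b) 1).map (fun a => (2:Int) * a)
        ++ PySem.List.pyRange ((n - b) * 2) n 1) 0, 0 ≤ p.2 := by
    intro p hp
    have h2 : p.2 ∈ (PySem.List.pyRange 0 (n - b) 1).map (fun a => (2:Int) * a)
        ++ PySem.List.pyRange ((n - b) * 2) n 1 := by
      rw [← PySem.List.map_snd_enumerate (xs := (PySem.List.pyRange 0 (n - b) 1).map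
        (fun a => (2:Int) * a) ++ PySem.List.pyRange ((n - b) * 2) n 1) (s := 0)]
      exact List.mem_map_of_mem hp
    exact (hLbd _ h2).1
  have hnd2 : ((PySem.List.enumerate
      ((PySem.List.pyRange 0 (n - b) 1).map (fun a => (2:Int) * a)
        ++ PySem.List.pyRange ((n - b) * 2) n 1) 0).map (·.2)).Nodup := by
    rw [PySem.List.map_snd_enumerate]
    exact hLnd
  apply List.ext_getElem (by
    rw [pv_fold_length, List.length_replicate, List.length_map,
      PySem.List.length_pyRange_one]
    omega)
  intro k hk1 hk2
  have hk : k < n.toNat := by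
    rw [pv_fold_length, List.length_replicate] at hk1
    exact hk1
  rw [List.getElem_map, PySem.List.getElem_pyRange_one, zero_add]
  by_cases hkp : (k : Int) < (n - b) * 2
  · by_cases hke : k % 2 = 0
    · -- even real below part1: written at active index k / 2
      have hj : k / 2 < ((PySem.List.pyRange 0 (n - b) 1).map (fun a => (2:Int) * a)
          ++ PySem.List.pyRange ((n - b) * 2) n 1).length := by
        rw [List.length_append, hMlen, hTlen]
        omega
      have hLj : ((PySem.List.pyRange 0 (n - b) 1).map (fun a => (2:Int) * a)
          ++ PySem.List.pyRange ((n - b) * 2) n 1)[k / 2]'hj = (k : Int) := by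
        rw [List.getElem_append_left (by rw [hMlen]; omega)]
        rw [List.getElem_map, PySem.List.getElem_pyRange_one]
        push_cast
        omega
      have hmem : (((k / 2 : Nat) : Int), (k : Int)) ∈ PySem.List.enumerate
          ((PySem.List.pyRange 0 (n - b) 1).map (fun a => (2:Int) * a)
            ++ PySem.List.pyRange ((n - b) * 2) n 1) 0 := by
        rw [PySem.List.mem_enumerate_iff]
        exact ⟨k / 2, hj, by rw [hLj, zero_add]⟩
      have hfold := pv_fold_hit _ (List.replicate n.toNat none) _ k hbds
        (by simpa using hk) hnd2 hmem
      rw [List.getElem?_eq_getElem hk1] at hfold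
      rw [Option.some.inj hfold]
      have hmod : PySem.Int.mod (k : Int) 2 = 0 := by
        rw [PySem.Int.mod_eq_emod_of_pos (by norm_num : (0:Int) < 2)]
        omega
      have hfd2 : PySem.Int.floordiv (k : Int) 2 = ((k / 2 : Nat) : Int) := by
        rw [PySem.Int.floordiv_eq_ediv_of_pos (by norm_num : (0:Int) < 2)]
        omega
      rw [if_pos hkp, hmod, hfd2]
      norm_num
    · -- odd real below part1: never written, stays None
      have hne : ∀ p ∈ PySem.List.enumerate
          ((PySem.List.pyRange 0 (n - b) 1).map (fun a => (2:Int) * a)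
            ++ PySem.List.pyRange ((n - b) * 2) n 1) 0, p.2 ≠ (k : Int) := by
        intro p hp hpk
        have h2 : p.2 ∈ (PySem.List.pyRange 0 (n - b) 1).map (fun a => (2:Int) * a)
            ++ PySem.List.pyRange ((n - b) * 2) n 1 := by
          rw [← PySem.List.map_snd_enumerate (xs := (PySem.List.pyRange 0 (n - b) 1).map
            (fun a => (2:Int) * a) ++ PySem.List.pyRange ((n - b) * 2) n 1) (s := 0)]
          exact List.mem_map_of_mem hp
        rcases List.mem_append.mp h2 with h | h
        · obtain ⟨a, h1a, h2a, he⟩ := hMmem _ h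
          omega
        · have := hTmem _ h
          omega
      have hfold := pv_fold_untouched _ (List.replicate n.toNat none) k hbds hne
      rw [List.getElem?_eq_getElem hk1,
        List.getElem?_replicate_of_lt (by simpa using hk)] at hfold
      rw [Option.some.inj hfold]
      have hmod : PySem.Int.mod (k : Int) 2 = 1 := by
        rw [PySem.Int.mod_eq_emod_of_pos (by norm_num : (0:Int) < 2)]
        omega
      rw [if_pos hkp, hmod]
      norm_num
  · -- tail real: written at active index (n - b).toNat + (k - ((n-b)*2).toNat)
    have hj : (n - b).toNat + (k - ((n - b) * 2).toNat)
        < ((PySem.List.pyRange 0 (n - b) 1).map (fun a => (2:Int) * a)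
          ++ PySem.List.pyRange ((n - b) * 2) n 1).length := by
      rw [List.length_append, hMlen, hTlen]
      omega
    have hLj : ((PySem.List.pyRange 0 (n - b) 1).map (fun a => (2:Int) * a)
        ++ PySem.List.pyRange ((n - b) * 2) n 1)[(n - b).toNat + (k - ((n - b) * 2).toNat)]'hj
        = (k : Int) := by
      rw [List.getElem_append_right (by rw [hMlen]; omega)]
      rw [PySem.List.getElem_pyRange_one, hMlen]
      omega
    have hmem : ((((n - b).toNat + (k - ((n - b) * 2).toNat) : Nat) : Int), (k : Int))
        ∈ PySem.List.enumerate
          ((PySem.List.pyRange 0 (n - b) 1).map (fun a => (2:Int) * a)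
            ++ PySem.List.pyRange ((n - b) * 2) n 1) 0 := by
      rw [PySem.List.mem_enumerate_iff]
      exact ⟨(n - b).toNat + (k - ((n - b) * 2).toNat), hj, by rw [hLj, zero_add]⟩
    have hfold := pv_fold_hit _ (List.replicate n.toNat none) _ k hbds
      (by simpa using hk) hnd2 hmem
    rw [List.getElem?_eq_getElem hk1] at hfold
    rw [Option.some.inj hfold, if_neg hkp]
    have : ((((n - b).toNat + (k - ((n - b) * 2).toNat) : Nat) : Int))
        = (n - b) + ((k : Int) - (n - b) * 2) := by
      push_cast
      omega
    rw [this]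

theorem pv_main (n : Int) (h1 : 1 ≤ n) :
    build_active_rank_maps_py n = build_active_rank_maps_py_alt n := by
  have hNn : ((n.toNat : Nat) : Int) = n := by omega
  have hble : largest_power_of_two_leq n ≤ n := by
    unfold largest_power_of_two_leq
    have h := Nat.pow_log_le_self 2 (x := n.toNat) (by omega : n.toNat ≠ 0)
    calc ((2:Int) ^ Nat.log 2 n.toNat)
        = ((2 ^ Nat.log 2 n.toNat : Nat) : Int) := by push_cast; ring
      _ ≤ (n.toNat : Int) := by exact_mod_cast h
      _ = n := hNn
  have hlt : n < 2 * largest_power_of_two_leq n := by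
    unfold largest_power_of_two_leq
    have h := Nat.lt_pow_succ_log_self (b := 2) (by norm_num) n.toNat
    rw [pow_succ] at h
    calc n = (n.toNat : Int) := hNn.symm
      _ < ((2 ^ Nat.log 2 n.toNat * 2 : Nat) : Int) := by exact_mod_cast h
      _ = 2 * (2:Int) ^ Nat.log 2 n.toNat := by push_cast; ring
  have hb1 : (1:Int) ≤ largest_power_of_two_leq n := by
    unfold largest_power_of_two_leq
    exact one_le_pow₀ (by norm_num)
  have hfd : PySem.Int.floordiv ((n - largest_power_of_two_leq n) * 2) 2
      = n - largest_power_of_two_leq n := by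
    rw [PySem.Int.floordiv_eq_ediv_of_pos (by norm_num : (0:Int) < 2)]
    exact Int.mul_ediv_cancel _ (by norm_num)
  simp only [build_active_rank_maps_py, build_active_rank_maps_py_alt, hfd]
  rw [pv_atr n _ hble hlt, pv_rta n _ h1 hble hlt]

-- ===== VERDICT (by name: the statement is the Claim_ definition above) =====
theorem build_active_rank_maps_py_spec : Claim_equal_build_active_rank_maps_py := by
  intro n _ hpre
  exact pv_main n hpre
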